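-- pv_equiv track=rewrite | github.com/Helloworld616/algorithm | SWEA/문제풀이 DAY/1860_진기의최고급붕어빵/sol1.py | solution
-- ===== SOURCE A (Python) =====
-- def solution(client, M, K):
--     fish = 0
--     time = 0
--     idx = 0
--
--     while idx < len(client):
--         if time > 0 and time % M == 0:
--             fish += K
--
--         while idx < len(client) and time == client[idx]:
--             if fish < 1:
--                 return 'Impossible'
--             else:
--                 fish -= 1
--             idx += 1
--
--         time += 1
--
--     return 'Possible'
-- ===== SOURCE B (Python) =====
-- def solution(client, M, K):
--     # closed form: client i (0-indexed, clients sorted by time) can be served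
--     # iff the fish baked by its time, (client[i] // M) * K, covers i+1 sales
--     if all((c // M) * K >= i + 1 for i, c in enumerate(client)):
--         return 'Possible'
--     return 'Impossible'
-- ===== Notes on version B (the rewrite author's own statement) =====
-- stated objective: alternative
-- what changed: Replaces the minute-by-minute simulation (loop over time up to max(client), baking K fish every M minutes and serving clients) by the per-client closed-form feasibility check (client[i]//M)*K >= i+1; Pre_ keeps the natural domain M >= 1 (A raises ZeroDivisionError at M=0, and for negative M A's `time % M == 0` accidentally fires at multiples of |M|, a malformed-interval corner), and excludes inputs on which A's while loop never terminates (clients not nondecreasing-nonnegative without an earlier unservable client).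
-- outside the precondition, e.g. on solution([0], 0, 1): A returns 'Impossible', B raises ZeroDivisionError; on solution([2], -2, 1): A returns 'Possible', B returns 'Impossible'
import Mathlib
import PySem

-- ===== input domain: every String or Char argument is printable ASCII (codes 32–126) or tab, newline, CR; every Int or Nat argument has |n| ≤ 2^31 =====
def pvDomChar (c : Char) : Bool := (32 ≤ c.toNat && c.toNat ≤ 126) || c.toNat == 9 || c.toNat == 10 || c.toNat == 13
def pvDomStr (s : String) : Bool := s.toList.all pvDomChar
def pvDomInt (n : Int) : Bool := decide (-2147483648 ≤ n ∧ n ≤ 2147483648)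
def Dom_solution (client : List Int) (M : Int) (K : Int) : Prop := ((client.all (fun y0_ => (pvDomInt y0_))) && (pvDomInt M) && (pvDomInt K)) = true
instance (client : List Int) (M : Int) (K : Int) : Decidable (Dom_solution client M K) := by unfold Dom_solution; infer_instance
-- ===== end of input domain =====

-- B replaces A's minute-by-minute simulation by the per-client closed-form check (client[i]//M)*K ≥ i+1 (objective: alternative algorithm).

-- ===== PORT A =====
-- inner while: serve the consecutive clients whose time equals `time`; none = Python's 'return Impossible'
def serveA (client : List Int) (time : Int) (fish : Int) (idx : Nat) : Option (Int × Nat) :=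
  if h : idx < client.length ∧ client[idx]! = time then
    if fish < 1 then none
    else serveA client time (fish - 1) (idx + 1)
  else some (fish, idx)
termination_by client.length - idx
decreasing_by omega

-- outer while, made total with fuel (under Pre_ the Python loop runs `time` up to max(client)+1,
-- so the fuel below provably suffices; fuel exhaustion is unreachable inside Pre_)
def loopA (client : List Int) (M : Int) (K : Int) : Nat → Int → Int → Nat → String
  | 0, _, _, _ => "Possible"
  | fuel + 1, fish, time, idx =>
    if idx < client.length then
      let fish' := if 0 < time ∧ PySem.Int.mod time M = 0 then fish + K else fish
      match serveA client time fish' idx with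
      | none => "Impossible"
      | some (fish'', idx') => loopA client M K fuel fish'' (time + 1) idx'
    else "Possible"

def solution (client : List Int) (M : Int) (K : Int) : String :=
  loopA client M K ((client.foldl max 0).toNat + 1) 0 0 0

-- ===== PORT B =====
def solution_alt (client : List Int) (M : Int) (K : Int) : String :=
  if (PySem.List.enumerate client).all
      (fun ic => decide (ic.1 + 1 ≤ PySem.Int.floordiv ic.2 M * K)) then
    "Possible"
  else
    "Impossible"

-- ===== PRECONDITION & SPEC =====
-- Pre_ keeps the natural domain of a baking interval, 1 ≤ M: at M = 0 A raises ZeroDivisionError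
-- once the clock reaches minute 1, and for M < 0 A's 'time % M == 0' accidentally fires at
-- multiples of |M| (a malformed negative interval, excluded as outside the task's natural domain).
-- Pre_ also excludes the inputs on which A's while loop never terminates: the clock only counts
-- up, so A returns exactly when the clients are nondecreasing and nonnegative, or some client j
-- reached through such a prefix is already unservable ((client[j] // M) * K < j + 1), making A
-- return 'Impossible' before the disorder.
def Pre_solution (client : List Int) (M : Int) (K : Int) : Prop :=
  1 ≤ M ∧
    ((client.Pairwise (· ≤ ·) ∧ ∀ x ∈ client, 0 ≤ x) ∨
      ∃ j < client.length, (∀ i ≤ j, 0 ≤ client[i]!) ∧ (∀ i < j, client[i]! ≤ client[i+1]!) ∧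
        PySem.Int.floordiv client[j]! M * K < (j : Int) + 1)
instance (client : List Int) (M : Int) (K : Int) : Decidable (Pre_solution client M K) := by
  unfold Pre_solution; infer_instance

def pvWitness_solution : List Int × Int × Int := ([3, 3, 6], 3, 2)

def Spec_solution (client : List Int) (M : Int) (K : Int) (out : String) : Prop := out = solution_alt client M K
instance (client : List Int) (M : Int) (K : Int) (out : String) : Decidable (Spec_solution client M K out) := by unfold Spec_solution; infer_instance

-- ===== CLAIM (what is proved, stated in full; the proofs are below) =====
def Claim_equal_solution : Prop := ∀ (client : List Int) (M : Int) (K : Int), Dom_solution client M K → Pre_solution client M K → Spec_solution client M K (solution client M K)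

-- ===== LEMMAS AND PROOFS =====

-- end of the run of clients equal to `time` starting at idx
def runEnd (client : List Int) (time : Int) (idx : Nat) : Nat :=
  if h : idx < client.length ∧ client[idx]! = time then runEnd client time (idx + 1) else idx
termination_by client.length - idx
decreasing_by omega

theorem runEnd_ge (client : List Int) (time : Int) (idx : Nat) :
    idx ≤ runEnd client time idx := by
  fun_induction runEnd with
  | case1 idx h ih => omega
  | case2 idx h => omega

theorem runEnd_le (client : List Int) (time : Int) (idx : Nat) (h : idx ≤ client.length) :
    runEnd client time idx ≤ client.length := by
  fun_induction runEnd with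
  | case1 idx h ih => exact ih (by omega)
  | case2 idx h => omega

theorem runEnd_mem (client : List Int) (time : Int) (idx : Nat) :
    ∀ j, idx ≤ j → j < runEnd client time idx → client[j]! = time := by
  fun_induction runEnd with
  | case1 idx h ih =>
      intro j hj1 hj2
      rcases Nat.eq_or_lt_of_le hj1 with rfl | hlt
      · exact h.2
      · exact ih j hlt hj2
  | case2 idx h => intro j hj1 hj2; omega

theorem runEnd_stop (client : List Int) (time : Int) (idx : Nat) :
    ¬ (runEnd client time idx < client.length ∧ client[runEnd client time idx]! = time) := by
  fun_induction runEnd with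
  | case1 idx h ih => exact ih
  | case2 idx h => exact h

theorem runEnd_succ (client : List Int) (time : Int) (idx : Nat)
    (h : idx < client.length ∧ client[idx]! = time) :
    runEnd client time idx = runEnd client time (idx + 1) := by
  rw [runEnd.eq_def, dif_pos h]

-- the inner while as a whole: fail iff the run is non-empty and fish runs out inside it
theorem serveA_run (client : List Int) (time : Int) (fish : Int) (idx : Nat) :
    serveA client time fish idx =
      if idx < runEnd client time idx ∧ fish < (runEnd client time idx : Int) - idx then none
      else some (fish - ((runEnd client time idx : Int) - idx), runEnd client time idx) := by
  fun_induction serveA with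
  | case1 fish idx h hf =>
      have h1 := runEnd_succ client time idx h
      have h2 := runEnd_ge client time (idx + 1)
      rw [if_pos ⟨by omega, by omega⟩]
  | case2 fish idx h hf ih =>
      have h1 := runEnd_succ client time idx h
      have h2 := runEnd_ge client time (idx + 1)
      rw [ih, h1]
      push_cast
      split_ifs with h3 h4 h4
      · rfl
      · exfalso; push_cast at h2; omega
      · exfalso; push_cast at h2; omega
      · simp only [Option.some.injEq, Prod.mk.injEq]
        exact ⟨by omega, trivial⟩
  | case3 fish idx h =>
      have h1 : runEnd client time idx = idx := by rw [runEnd.eq_def, dif_neg h]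
      rw [h1, if_neg (by omega)]
      simp

-- number of refill instants in [1, t] (0 for t < 0), for interval m
def cnt (m t : Int) : Int := if t < 0 then 0 else PySem.Int.floordiv t m

theorem cnt_step (m t : Int) (hm : 0 < m) (ht : 0 ≤ t) :
    cnt m t = cnt m (t - 1) + (if 0 < t ∧ m ∣ t then 1 else 0) := by
  rcases eq_or_lt_of_le ht with rfl | htpos
  · simp [cnt, PySem.Int.floordiv_eq_ediv_of_pos hm]
  · have hq : PySem.Int.floordiv (t - 1) m * m ≤ t - 1 ∧ t - 1 < (PySem.Int.floordiv (t - 1) m + 1) * m :=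
      (PySem.Int.floordiv_eq_iff_of_pos hm).mp rfl
    set q := PySem.Int.floordiv (t - 1) m with hqdef
    have hc : cnt m t = PySem.Int.floordiv t m := by simp [cnt]; omega
    have hc' : cnt m (t - 1) = q := by simp only [cnt]; rw [if_neg (by omega)]
    rw [hc, hc']
    by_cases hd : m ∣ t
    · obtain ⟨s, rfl⟩ := hd
      rw [if_pos ⟨htpos, ⟨s, rfl⟩⟩]
      apply (PySem.Int.floordiv_eq_iff_of_pos hm).mpr
      have h1 : q * m < s * m := by have := hq.1; linarith [mul_comm s m]
      have hqs : q < s := lt_of_mul_lt_mul_right h1 hm.le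
      have h2 : (q + 1) * m ≤ s * m := mul_le_mul_of_nonneg_right (by omega) hm.le
      constructor
      · linarith [mul_comm s m]
      · have := hq.2; nlinarith
    · rw [if_neg (by tauto), add_zero]
      apply (PySem.Int.floordiv_eq_iff_of_pos hm).mpr
      refine ⟨by linarith [hq.1], ?_⟩
      have hle : t ≤ (q + 1) * m := by linarith [hq.2]
      refine lt_of_le_of_ne hle (fun he => hd ?_)
      exact he ▸ dvd_mul_left m (q + 1)

-- loop invariant: at the head of A's outer loop, fish = K·cnt(time-1) − idx, every pending client
-- is due at or after `time`, and the fuel bounds the remaining clock ticks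
theorem loop_main (client : List Int) (M K : Int) (P : Nat) (hM : 1 ≤ M)
    (hP : P ≤ client.length)
    (hmono : ∀ i j, i < j → j < P → client[i]! ≤ client[j]!) :
    ∀ (fuel : Nat) (time : Int) (idx : Nat) (fish : Int),
      0 ≤ time →
      idx ≤ client.length →
      (∀ j, j < P → idx ≤ j → time ≤ client[j]!) →
      fish = K * cnt M (time - 1) - idx →
      (∀ j, j < P → idx ≤ j → client[j]! < time + fuel) →
      (P = client.length ∨ ∃ j, idx ≤ j ∧ j < P ∧ PySem.Int.floordiv client[j]! M * K < (j : Int) + 1) →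
      loopA client M K fuel fish time idx =
        if (P = client.length ∧ ∀ j, j < P → idx ≤ j → (j : Int) + 1 ≤ PySem.Int.floordiv client[j]! M * K)
        then "Possible" else "Impossible" := by
  have hm : (0:Int) < M := by omega
  intro fuel
  induction fuel with
  | zero =>
      intro time idx fish ht hidx hlow hfish hfuel halt
      have hemp : ∀ j, j < P → idx ≤ j → False := by
        intro j hj hij
        have h1 := hlow j hj hij
        have h2 := hfuel j hj hij
        push_cast at h2
        omega
      simp only [loopA]
      rw [if_pos]
      refine ⟨?_, fun j hj hij => absurd (hemp j hj hij) not_false⟩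
      rcases halt with h | ⟨j, hij, hj, _⟩
      · exact h
      · exact absurd (hemp j hj hij) not_false
  | succ n ih =>
      intro time idx fish ht hidx hlow hfish hfuel halt
      simp only [loopA]
      by_cases hix : idx < client.length
      · rw [if_pos hix]
        have hcnt0 : cnt M time = PySem.Int.floordiv time M := by
          simp only [cnt]; rw [if_neg (by omega)]
        have hfish' : (if 0 < time ∧ PySem.Int.mod time M = 0 then fish + K else fish)
            = K * cnt M time - idx := by
          have hmodiff : (PySem.Int.mod time M = 0) ↔ (M ∣ time) :=
            PySem.Int.mod_eq_zero_iff_dvd time M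
          rw [cnt_step M time hm ht, hfish]
          by_cases hdv : 0 < time ∧ M ∣ time
          · rw [if_pos ⟨hdv.1, hmodiff.mpr hdv.2⟩, if_pos hdv]; ring
          · by_cases htp : 0 < time
            · rw [if_neg (fun hc => hdv ⟨htp, hmodiff.mp hc.2⟩), if_neg hdv]; ring
            · rw [if_neg (fun hc => htp hc.1), if_neg hdv]; ring
        rw [hfish', serveA_run]
        have hge := runEnd_ge client time idx
        have hle := runEnd_le client time idx hidx
        have hmem := runEnd_mem client time idx
        have hstop := runEnd_stop client time idx
        set r := runEnd client time idx with hr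
        by_cases hfail : idx < r ∧ K * cnt M time - (idx:Int) < (r : Int) - idx
        · rw [if_pos hfail]
          rw [if_neg]
          rintro ⟨hPlen, hall⟩
          have hmem' : client[r-1]! = time := hmem (r-1) (by omega) (by omega)
          have := hall (r-1) (by omega) (by omega)
          rw [hmem', hcnt0.symm] at this
          have hc : ((r:Int) - 1 : Int) + 1 ≤ cnt M time * K := by
            have : ((r-1 : Nat) : Int) + 1 ≤ cnt M time * K := this
            push_cast [Nat.cast_sub (by omega : 1 ≤ r)] at this
            linarith
          have := hfail.2
          linarith [mul_comm K (cnt M time)]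
        · rw [if_neg hfail]
          have hnoshort : ∀ j, idx ≤ j → j < r →
              ¬ (PySem.Int.floordiv client[j]! M * K < (j : Int) + 1) := by
            intro j hij hjr hshort
            have hmem' : client[j]! = time := hmem j hij hjr
            rw [hmem', ← hcnt0] at hshort
            have hok : ¬ (K * cnt M time - (idx:Int) < (r : Int) - idx) :=
              fun hlt => hfail ⟨by omega, hlt⟩
            push Not at hok
            have : ((j:Int)) + 1 ≤ (r:Int) := by omega
            linarith [mul_comm K (cnt M time)]
          have halt' : P = client.length ∨ ∃ j, r ≤ j ∧ j < P ∧
              PySem.Int.floordiv client[j]! M * K < (j : Int) + 1 := by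
            rcases halt with h | ⟨j, hij, hj, hshort⟩
            · exact Or.inl h
            · refine Or.inr ⟨j, ?_, hj, hshort⟩
              by_contra hlt
              exact hnoshort j hij (by omega) hshort
          have hlow' : ∀ j, j < P → r ≤ j → time + 1 ≤ client[j]! := by
            intro j hj hrj
            have hrlen : r < client.length := by omega
            have hne : client[r]! ≠ time := fun he => hstop ⟨hrlen, he⟩
            have hler : time ≤ client[r]! := hlow r (by omega) hge
            have h1 : time + 1 ≤ client[r]! := lt_of_le_of_ne hler (Ne.symm hne)
            rcases eq_or_lt_of_le hrj with rfl | hlt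
            · exact h1
            · exact le_trans h1 (hmono r j hlt hj)
          show loopA client M K n (K * cnt M time - (idx:Int) - ((r:Int) - (idx:Int))) (time + 1) r = _
          rw [ih (time + 1) r (K * cnt M time - ↑idx - (↑r - ↑idx))
                (by omega) hle hlow'
                (by simp only [add_sub_cancel_right]; ring)
                (by intro j hj hrj
                    have := hfuel j hj (le_trans hge hrj)
                    push_cast at this ⊢
                    omega)
                halt']
          have hiff : (P = client.length ∧ ∀ j, j < P → r ≤ j → (j : Int) + 1 ≤ PySem.Int.floordiv client[j]! M * K)
              ↔ (P = client.length ∧ ∀ j, j < P → idx ≤ j → (j : Int) + 1 ≤ PySem.Int.floordiv client[j]! M * K) := by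
            refine and_congr_right fun _ => ⟨?_, ?_⟩
            · intro hC2 j hj hij
              by_cases hjr : j < r
              · by_contra hshort
                exact hnoshort j hij hjr (by omega)
              · exact hC2 j hj (by omega)
            · intro hC1 j hj hrj
              exact hC1 j hj (le_trans hge hrj)
          by_cases hC : P = client.length ∧ ∀ j, j < P → idx ≤ j → (j : Int) + 1 ≤ PySem.Int.floordiv client[j]! M * K
          · rw [if_pos (hiff.mpr hC), if_pos hC]
          · rw [if_neg (fun h => hC (hiff.mp h)), if_neg hC]
      · rw [if_neg hix]
        rw [if_pos]
        have hemp : ∀ j, j < P → idx ≤ j → False := by intro j hj hij; omega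
        refine ⟨?_, fun j hj hij => absurd (hemp j hj hij) not_false⟩
        rcases halt with h | ⟨j, hij, hj, _⟩
        · exact h
        · exact absurd (hemp j hj hij) not_false

theorem solution_eq_alt (client : List Int) (M K : Int)
    (hpre : Pre_solution client M K) :
    solution client M K = solution_alt client M K := by
  obtain ⟨hM, hpre⟩ := hpre
  have hmem! : ∀ j, j < client.length → client[j]! ∈ client := by
    intro j hj; rw [getElem!_pos client j hj]; exact List.getElem_mem hj
  have hfuelmax : ∀ j, j < client.length →
      client[j]! < 0 + (((client.foldl max 0).toNat + 1 : Nat) : Int) := by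
    intro j hj
    have h1 := (PySem.List.le_foldl_max client 0).2 _ (hmem! j hj)
    have h2 := Int.self_le_toNat (client.foldl max 0)
    push_cast
    omega
  have hallmem : ∀ (p : Int × Int), p ∈ PySem.List.enumerate client →
      ∃ (k : Nat) (hk : k < client.length), p = ((k : Int), client[k]!) := by
    intro p hp
    rw [PySem.List.mem_enumerate_iff] at hp
    obtain ⟨k, hk, rfl⟩ := hp
    exact ⟨k, hk, by rw [getElem!_pos client k hk]; simp⟩
  unfold solution solution_alt
  rcases hpre with ⟨hsort, hpos⟩ | ⟨j0, hj0, hpos0, hchain, hshort⟩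
  · -- sorted, nonnegative clients: the full closed form
    rw [loop_main client M K client.length hM le_rfl
          (by intro i j hij hj
              rw [getElem!_pos client i (by omega), getElem!_pos client j hj]
              exact List.pairwise_iff_getElem.mp hsort i j (by omega) hj hij)
          ((client.foldl max 0).toNat + 1) 0 0 0 le_rfl (Nat.zero_le _)
          (fun j hj _ => hpos _ (hmem! j hj))
          (by norm_num [cnt])
          (fun j hj _ => hfuelmax j hj)
          (Or.inl rfl)]
    have hiff : ((PySem.List.enumerate client).all
          (fun ic => decide (ic.1 + 1 ≤ PySem.Int.floordiv ic.2 M * K)) = true)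
        ↔ (client.length = client.length ∧
            ∀ j, j < client.length → 0 ≤ j → (j : Int) + 1 ≤ PySem.Int.floordiv client[j]! M * K) := by
      rw [and_iff_right rfl, List.all_eq_true]
      constructor
      · intro hall j hj _
        have := hall ((j : Int), client[j]!)
            (by rw [PySem.List.mem_enumerate_iff]
                refine ⟨j, hj, ?_⟩
                rw [getElem!_pos client j hj]
                simp)
        simpa using this
      · intro h p hp
        obtain ⟨k, hk, rfl⟩ := hallmem p hp
        have := h k hk (Nat.zero_le k)
        simpa using this
    by_cases hC : client.length = client.length ∧
        ∀ j, j < client.length → 0 ≤ j → (j : Int) + 1 ≤ PySem.Int.floordiv client[j]! M * K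
    · rw [if_pos hC, if_pos (hiff.mpr hC)]
    · rw [if_neg hC, if_neg (fun h => hC (hiff.mp h))]
  · -- a sorted nonnegative prefix ends in an unservable client: both sides say Impossible
    have hmono : ∀ a b, a < b → b ≤ j0 → client[a]! ≤ client[b]! := by
      intro a b hab hbj
      induction b with
      | zero => omega
      | succ b ihb =>
          have hstep : client[b]! ≤ client[b+1]! := hchain b (by omega)
          rcases Nat.lt_succ_iff_lt_or_eq.mp hab with h | rfl
          · exact le_trans (ihb h (by omega)) hstep
          · exact hstep
    rw [loop_main client M K (j0 + 1) hM (by omega)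
          (fun i j hij hj => hmono i j hij (by omega))
          ((client.foldl max 0).toNat + 1) 0 0 0 le_rfl (Nat.zero_le _)
          (fun j hj _ => hpos0 j (by omega))
          (by norm_num [cnt])
          (fun j hj _ => hfuelmax j (by omega))
          (Or.inr ⟨j0, Nat.zero_le _, Nat.lt_succ_self _, hshort⟩)]
    rw [if_neg (by rintro ⟨hlen, hall⟩
                   have := hall j0 (by omega) (Nat.zero_le _)
                   omega)]
    rw [if_neg (by intro hall
                   have := List.all_eq_true.mp hall ((j0 : Int), client[j0]!)
                       (by rw [PySem.List.mem_enumerate_iff]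
                           refine ⟨j0, hj0, ?_⟩
                           rw [getElem!_pos client j0 hj0]
                           simp)
                   simp only [decide_eq_true_eq] at this
                   omega)]

-- ===== VERDICT (by name: the statement is the Claim_ definition above) =====
theorem solution_spec : Claim_equal_solution := by
  intro client M K _ hpre
  exact solution_eq_alt client M K hpre
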